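-- pv_equiv track=rewrite | github.com/longtermrisk/marltoolbox | marltoolbox/utils/exploration.py | group_cluster
-- ===== SOURCE A (Python) =====
-- def group_cluster(key, clusters, group=None):
--     if group is None:
--         group = []
--     if key in clusters.keys() and key not in group:
--         group.append(key)
--         for key_added in clusters[key]:
--             group = group_cluster(key_added, clusters, group)
--     return group
-- ===== SOURCE B (Python) =====
-- def group_cluster(key, clusters, group=None):
--     group = [] if group is None else group
--     seen = set(group)          # membership tested against a set, not the group list
--     order = []                 # the newly discovered keys, in DFS pre-order
--     stack = [key]
--     while stack:
--         k = stack.pop()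
--         if k in clusters and k not in seen:
--             seen.add(k)
--             order.append(k)
--             stack.extend(reversed(clusters[k]))  # first child on top
--     group.extend(order)
--     return group
-- ===== Notes on version B (the rewrite author's own statement) =====
-- stated objective: alternative
-- what changed: Replaces A's recursive DFS with list-membership scans by an iterative explicit-stack DFS that keeps a set of seen keys and a separate order list extended onto group at the end.
import Mathlib
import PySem

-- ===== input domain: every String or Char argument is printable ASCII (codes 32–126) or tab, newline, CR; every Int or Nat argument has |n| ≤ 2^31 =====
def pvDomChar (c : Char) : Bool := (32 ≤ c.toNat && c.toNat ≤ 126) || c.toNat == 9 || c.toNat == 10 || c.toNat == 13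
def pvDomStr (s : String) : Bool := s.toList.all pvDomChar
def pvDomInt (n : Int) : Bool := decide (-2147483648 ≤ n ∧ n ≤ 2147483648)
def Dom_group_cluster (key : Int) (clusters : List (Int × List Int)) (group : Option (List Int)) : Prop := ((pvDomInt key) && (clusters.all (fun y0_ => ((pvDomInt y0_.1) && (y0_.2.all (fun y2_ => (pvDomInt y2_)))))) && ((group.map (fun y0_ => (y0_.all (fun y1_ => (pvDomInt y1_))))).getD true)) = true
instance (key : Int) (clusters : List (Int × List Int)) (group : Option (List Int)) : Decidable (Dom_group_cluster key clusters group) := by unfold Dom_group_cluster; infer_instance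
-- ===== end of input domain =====

-- B replaces A's recursive DFS (list-membership scans against the growing group) by an iterative
-- explicit-stack DFS that keeps a SET of already-seen keys and a separate `order` list extended onto
-- `group` only at the end (alternative decomposition). Both Pythons mutate and return the caller's
-- `group` list; the equivalence proved is about the returned value.

-- ===== PORT A =====
-- dict lookup (first match = Python dict on its unique keys)
def pvKids (clusters : List (Int × List Int)) (key : Int) : Option (List Int) :=
  match clusters with
  | [] => none
  | (k, v) :: rest => if k = key then some v else pvKids rest key

-- A's recursion, with a fuel argument as a pure totality guard (fuel `clusters.length + 1`
-- exceeds the recursion's append depth on every input, so the 0 branch is never the result).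
def pvGoA (clusters : List (Int × List Int)) : Nat → Int → List Int → List Int
  | 0, _, g => g
  | f + 1, key, g =>
    match pvKids clusters key with
    | none => g
    | some kids =>
      if key ∈ g then g
      else kids.foldl (fun acc k => pvGoA clusters f k acc) (g ++ [key])

def group_cluster (key : Int) (clusters : List (Int × List Int)) (group : Option (List Int)) : List Int :=
  pvGoA clusters (clusters.length + 1) key (group.getD [])

-- ===== PORT B =====
-- B's while-loop: the Python stack's top is its list's END and `stack.extend(reversed(kids))`
-- precedes a pop, so modelling the stack head-as-top makes that push `kids ++ stack` — exact.
-- State: stack, the seen set (PySem.Set), and the order list of newly found keys. Fuel is only a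
-- totality guard, never reached for the starting value below.
def pvLoopB (d : PySem.Dict Int (List Int)) : Nat → List Int → PySem.Set Int → List Int → List Int
  | 0, _, _, order => order
  | _ + 1, [], _, order => order
  | f + 1, k :: stack, seen, order =>
    match d.get? k with
    | none => pvLoopB d f stack seen order
    | some kids =>
      if PySem.Set.contains seen k then pvLoopB d f stack seen order
      else pvLoopB d f (kids ++ stack) (PySem.Set.add seen k) (order ++ [k])

def group_cluster_alt (key : Int) (clusters : List (Int × List Int)) (group : Option (List Int)) : List Int :=
  let g0 := group.getD []
  g0 ++ pvLoopB (PySem.Dict.mk clusters)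
    (clusters.length * ((clusters.map (fun p => p.2.length)).sum + 1) + 2)
    [key] (PySem.Set.ofList g0) []

-- ===== PRECONDITION & SPEC =====
def Spec_group_cluster (key : Int) (clusters : List (Int × List Int)) (group : Option (List Int)) (out : List Int) : Prop := out = group_cluster_alt key clusters group
instance (key : Int) (clusters : List (Int × List Int)) (group : Option (List Int)) (out : List Int) : Decidable (Spec_group_cluster key clusters group out) := by unfold Spec_group_cluster; infer_instance

-- ===== CLAIM (what is proved, stated in full; the proofs are below) =====
def Claim_equal_group_cluster : Prop := ∀ (key : Int) (clusters : List (Int × List Int)) (group : Option (List Int)), Dom_group_cluster key clusters group → Spec_group_cluster key clusters group (group_cluster key clusters group)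

-- ===== LEMMAS AND PROOFS =====

-- number of cluster-key occurrences not yet in g (the DFS's decreasing measure)
def pvCN (clusters : List (Int × List Int)) (g : List Int) : Nat :=
  (clusters.map Prod.fst).countP (fun k => decide (k ∉ g))

theorem pvCN_le (clusters : List (Int × List Int)) (g : List Int) :
    pvCN clusters g ≤ clusters.length := by
  calc pvCN clusters g ≤ (clusters.map Prod.fst).length := List.countP_le_length
    _ = clusters.length := by simp

theorem pvCN_anti (clusters : List (Int × List Int)) {g g' : List Int}
    (h : ∀ x, x ∈ g → x ∈ g') : pvCN clusters g' ≤ pvCN clusters g := by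
  refine List.countP_mono_left ?_
  intro k _ hk
  simp only [decide_eq_true_eq] at *
  exact fun hm => hk (h k hm)

theorem pvKids_mem {clusters : List (Int × List Int)} {key : Int} {kids : List Int}
    (h : pvKids clusters key = some kids) : (key, kids) ∈ clusters := by
  induction clusters with
  | nil => simp [pvKids] at h
  | cons p rest ih =>
    obtain ⟨k, v⟩ := p
    by_cases hk : k = key
    · subst hk
      simp [pvKids] at h
      subst h; exact List.mem_cons_self
    · simp [pvKids, hk] at h
      exact List.mem_cons_of_mem _ (ih h)

theorem pvKids_key_mem {clusters : List (Int × List Int)} {key : Int} {kids : List Int}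
    (h : pvKids clusters key = some kids) : key ∈ clusters.map Prod.fst :=
  List.mem_map.2 ⟨(key, kids), pvKids_mem h, rfl⟩

theorem pvKids_len_le {clusters : List (Int × List Int)} {key : Int} {kids : List Int}
    (h : pvKids clusters key = some kids) :
    kids.length ≤ (clusters.map (fun p => p.2.length)).sum := by
  refine List.single_le_sum (fun x _ => Nat.zero_le x) _ ?_
  exact List.mem_map.2 ⟨(key, kids), pvKids_mem h, rfl⟩

-- B's dict lookup agrees with A's hand-written first-match lookup
theorem pvDictGet_eq_pvKids (clusters : List (Int × List Int)) (key : Int) :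
    (PySem.Dict.mk clusters).get? key = pvKids clusters key := by
  induction clusters with
  | nil => rfl
  | cons p rest ih =>
    obtain ⟨k, v⟩ := p
    rw [PySem.Dict.get?_mk_cons]
    by_cases hk : k = key
    · simp [pvKids, hk]
    · simp [pvKids, hk, ih]

theorem pvCountP_strict (ks : List Int) (g : List Int) (key : Int)
    (hkey : key ∈ ks) (hng : key ∉ g) :
    ks.countP (fun k => decide (k ∉ g ++ [key])) < ks.countP (fun k => decide (k ∉ g)) := by
  induction ks with
  | nil => cases hkey
  | cons a as ih =>
    rcases List.mem_cons.1 hkey with heq | ha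
    · subst heq
      have h1 : decide (key ∉ g ++ [key]) = false := by simp
      have h2 : decide (key ∉ g) = true := by simpa using hng
      have hmono : as.countP (fun k => decide (k ∉ g ++ [key])) ≤ as.countP (fun k => decide (k ∉ g)) := by
        refine List.countP_mono_left ?_
        intro k _ hk
        simp only [decide_eq_true_eq] at *
        exact fun hm => hk (by simp [hm])
      simp only [List.countP_cons, h1, h2, Bool.false_eq_true, if_false, if_true]
      omega
    · have hih := ih ha
      by_cases hag : a ∈ g
      · have e1 : decide (a ∉ g ++ [key]) = false := by simp [hag]
        have e2 : decide (a ∉ g) = false := by simp [hag]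
        simp only [List.countP_cons, e1, e2, Bool.false_eq_true, if_false]
        omega
      · by_cases hag2 : a ∈ g ++ [key]
        · have e1 : decide (a ∉ g ++ [key]) = false := by simp [hag2]
          have e2 : decide (a ∉ g) = true := by simpa using hag
          simp only [List.countP_cons, e1, e2, Bool.false_eq_true, if_false, if_true]
          omega
        · have e1 : decide (a ∉ g ++ [key]) = true := by simpa using hag2
          have e2 : decide (a ∉ g) = true := by simpa using hag
          simp only [List.countP_cons, e1, e2, if_true]
          omega

-- strict decrease of the measure when a cluster key is appended
theorem pvCN_strict (clusters : List (Int × List Int)) {g : List Int} {key : Int}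
    (hkey : key ∈ clusters.map Prod.fst) (hng : key ∉ g) :
    pvCN clusters (g ++ [key]) < pvCN clusters g :=
  pvCountP_strict (clusters.map Prod.fst) g key hkey hng

-- A's recursion only appends to g
theorem pvGoA_prefix (clusters : List (Int × List Int)) :
    ∀ (f : Nat) (key : Int) (g : List Int), g <+: pvGoA clusters f key g := by
  intro f
  induction f with
  | zero => intro key g; simp [pvGoA]
  | succ f ih =>
    intro key g
    unfold pvGoA
    cases hk : pvKids clusters key with
    | none => simp
    | some kids =>
      by_cases hmem : key ∈ g
      · simp [hmem]
      · simp only [hmem, ite_false]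
        have base : g <+: g ++ [key] := ⟨[key], rfl⟩
        have hfold : ∀ (l : List Int) (a : List Int),
            a <+: l.foldl (fun acc k => pvGoA clusters f k acc) a := by
          intro l
          induction l with
          | nil => intro a; simp
          | cons x xs ihl =>
            intro a
            simp only [List.foldl_cons]
            exact (ih x a).trans (ihl (pvGoA clusters f x a))
        exact base.trans (hfold kids (g ++ [key]))

theorem pvGoA_subset (clusters : List (Int × List Int)) (f : Nat) (key : Int) (g : List Int) :
    ∀ x, x ∈ g → x ∈ pvGoA clusters f key g :=
  fun _ hx => (pvGoA_prefix clusters f key g).subset hx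

theorem pvCN_pvGoA_le (clusters : List (Int × List Int)) (f : Nat) (key : Int) (g : List Int) :
    pvCN clusters (pvGoA clusters f key g) ≤ pvCN clusters g :=
  pvCN_anti clusters (pvGoA_subset clusters f key g)

-- fuel irrelevance for A above the measure
theorem pvGoA_stable (clusters : List (Int × List Int)) :
    ∀ (f₁ f₂ : Nat) (key : Int) (g : List Int),
      pvCN clusters g < f₁ → pvCN clusters g < f₂ →
      pvGoA clusters f₁ key g = pvGoA clusters f₂ key g := by
  intro f₁
  induction f₁ with
  | zero => intro f₂ key g h1 _; omega
  | succ f ih =>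
    intro f₂ key g h1 h2
    cases f₂ with
    | zero => omega
    | succ f₂' =>
      unfold pvGoA
      cases hk : pvKids clusters key with
      | none => rfl
      | some kids =>
        by_cases hmem : key ∈ g
        · simp [hmem]
        · simp only [hmem, ite_false]
          have hlt : pvCN clusters (g ++ [key]) < pvCN clusters g :=
            pvCN_strict clusters (pvKids_key_mem hk) hmem
          have hfold : ∀ (l : List Int) (a : List Int),
              pvCN clusters a < f → pvCN clusters a < f₂' →
              l.foldl (fun acc k => pvGoA clusters f k acc) a
                = l.foldl (fun acc k => pvGoA clusters f₂' k acc) a := by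
            intro l
            induction l with
            | nil => intro a _ _; rfl
            | cons x xs ihl =>
              intro a ha1 ha2
              simp only [List.foldl_cons]
              rw [ih f₂' x a ha1 ha2]
              have hsub : pvCN clusters (pvGoA clusters f₂' x a) ≤ pvCN clusters a :=
                pvCN_pvGoA_le clusters f₂' x a
              exact ihl _ (by omega) (by omega)
          exact hfold kids (g ++ [key]) (by omega) (by omega)

-- the canonical step A computes
def pvGO (clusters : List (Int × List Int)) (g : List Int) (k : Int) : List Int :=
  pvGoA clusters (pvCN clusters g + 1) k g

theorem pvFold_GO (clusters : List (Int × List Int)) :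
    ∀ (l : List Int) (f : Nat) (a : List Int), pvCN clusters a < f →
      l.foldl (fun acc k => pvGoA clusters f k acc) a = l.foldl (pvGO clusters) a := by
  intro l
  induction l with
  | nil => intro f a _; rfl
  | cons x xs ihl =>
    intro f a ha
    simp only [List.foldl_cons]
    rw [pvGoA_stable clusters f (pvCN clusters a + 1) x a ha (by omega)]
    have hsub : pvCN clusters (pvGoA clusters (pvCN clusters a + 1) x a) ≤ pvCN clusters a :=
      pvCN_pvGoA_le clusters _ x a
    exact ihl f _ (by omega)

-- one canonical step, written out on each branch of the lookup/membership test
theorem pvGO_none (clusters : List (Int × List Int)) (g : List Int) (k : Int)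
    (hk : pvKids clusters k = none) : pvGO clusters g k = g := by
  unfold pvGO pvGoA
  rw [hk]

theorem pvGO_mem (clusters : List (Int × List Int)) (g : List Int) (k : Int)
    (hmem : k ∈ g) : pvGO clusters g k = g := by
  unfold pvGO pvGoA
  cases pvKids clusters k with
  | none => rfl
  | some kids => simp [hmem]

theorem pvGO_new (clusters : List (Int × List Int)) (g : List Int) (k : Int) (kids : List Int)
    (hk : pvKids clusters k = some kids) (hmem : k ∉ g) :
    pvGO clusters g k = kids.foldl (pvGO clusters) (g ++ [k]) := by
  have hlt : pvCN clusters (g ++ [k]) < pvCN clusters g :=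
    pvCN_strict clusters (pvKids_key_mem hk) hmem
  have h0 : pvGO clusters g k
      = kids.foldl (fun acc k => pvGoA clusters (pvCN clusters g) k acc) (g ++ [k]) := by
    conv_lhs => unfold pvGO pvGoA
    rw [hk]
    simp [hmem]
  rw [h0]
  exact pvFold_GO clusters kids (pvCN clusters g) (g ++ [k]) hlt

-- B's stack/seen/order loop, appended to the initial group, computes the fold of the canonical
-- step over the stack, provided the seen set holds exactly the members of g0 ++ order.
theorem pvLoopB_eq_fold (clusters : List (Int × List Int)) (g0 : List Int) :
    ∀ (fB : Nat) (s : List Int) (seen : PySem.Set Int) (order : List Int),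
      (∀ x, x ∈ seen ↔ x ∈ g0 ++ order) →
      pvCN clusters (g0 ++ order) * ((clusters.map (fun p => p.2.length)).sum + 1) + s.length < fB →
      g0 ++ pvLoopB (PySem.Dict.mk clusters) fB s seen order
        = s.foldl (pvGO clusters) (g0 ++ order) := by
  intro fB
  induction fB with
  | zero => intro s seen order _ h; omega
  | succ f ih =>
    intro s seen order hseen h
    cases s with
    | nil => simp [pvLoopB]
    | cons k s' =>
      unfold pvLoopB
      rw [pvDictGet_eq_pvKids]
      cases hk : pvKids clusters k with
      | none =>
        rw [ih s' seen order hseen (by simp at h ⊢; omega)]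
        simp only [List.foldl_cons, pvGO_none clusters (g0 ++ order) k hk]
      | some kids =>
        by_cases hmem : k ∈ g0 ++ order
        · have hc : PySem.Set.contains seen k = true := by
            rw [PySem.Set.contains_iff]; exact (hseen k).2 hmem
          simp only [hc, ite_true]
          rw [ih s' seen order hseen (by simp at h ⊢; omega)]
          simp only [List.foldl_cons, pvGO_mem clusters (g0 ++ order) k hmem]
        · have hc : PySem.Set.contains seen k = false := by
            rw [Bool.eq_false_iff]
            intro hco
            exact hmem ((hseen k).1 ((PySem.Set.contains_iff seen k).1 hco))
          simp only [hc, Bool.false_eq_true, ite_false]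
          have hlt : pvCN clusters ((g0 ++ order) ++ [k]) < pvCN clusters (g0 ++ order) :=
            pvCN_strict clusters (pvKids_key_mem hk) hmem
          have hkl : kids.length ≤ (clusters.map (fun p => p.2.length)).sum :=
            pvKids_len_le hk
          have hseen' : ∀ x, x ∈ PySem.Set.add seen k ↔ x ∈ g0 ++ (order ++ [k]) := by
            intro x
            rw [PySem.Set.mem_add]
            constructor
            · rintro (hx | rfl)
              · rcases List.mem_append.1 ((hseen x).1 hx) with h1 | h1
                · exact List.mem_append.2 (Or.inl h1)
                · exact List.mem_append.2 (Or.inr (List.mem_append.2 (Or.inl h1)))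
              · exact List.mem_append.2 (Or.inr (List.mem_append.2 (Or.inr List.mem_cons_self)))
            · intro hx
              rcases List.mem_append.1 hx with h1 | h1
              · exact Or.inl ((hseen x).2 (List.mem_append.2 (Or.inl h1)))
              · rcases List.mem_append.1 h1 with h2 | h2
                · exact Or.inl ((hseen x).2 (List.mem_append.2 (Or.inr h2)))
                · simp at h2; exact Or.inr h2
          have h2 : pvCN clusters ((g0 ++ order) ++ [k]) * ((clusters.map (fun p => p.2.length)).sum + 1)
              + ((clusters.map (fun p => p.2.length)).sum + 1)
              ≤ pvCN clusters (g0 ++ order) * ((clusters.map (fun p => p.2.length)).sum + 1) := by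
            calc pvCN clusters ((g0 ++ order) ++ [k]) * ((clusters.map (fun p => p.2.length)).sum + 1)
                  + ((clusters.map (fun p => p.2.length)).sum + 1)
                = (pvCN clusters ((g0 ++ order) ++ [k]) + 1) * ((clusters.map (fun p => p.2.length)).sum + 1) := by ring
              _ ≤ pvCN clusters (g0 ++ order) * ((clusters.map (fun p => p.2.length)).sum + 1) :=
                  Nat.mul_le_mul_right _ hlt
          have hmu : pvCN clusters (g0 ++ (order ++ [k])) * ((clusters.map (fun p => p.2.length)).sum + 1)
              + (kids ++ s').length < f := by
            rw [← List.append_assoc]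
            simp only [List.length_append, List.length_cons] at h2 h ⊢
            omega
          rw [ih (kids ++ s') (PySem.Set.add seen k) (order ++ [k]) hseen' hmu]
          rw [← List.append_assoc, List.foldl_append]
          simp only [List.foldl_cons, pvGO_new clusters (g0 ++ order) k kids hk hmem]

-- ===== VERDICT (by name: the statement is the Claim_ definition above) =====
theorem group_cluster_spec : Claim_equal_group_cluster := by
  intro key clusters group _
  unfold Spec_group_cluster group_cluster group_cluster_alt
  set g0 := group.getD [] with hg0
  have hcn : pvCN clusters g0 ≤ clusters.length := pvCN_le clusters g0
  rw [pvGoA_stable clusters (clusters.length + 1) (pvCN clusters g0 + 1) key g0 (by omega) (by omega)]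
  have hseen0 : ∀ x, x ∈ PySem.Set.ofList g0 ↔ x ∈ g0 ++ [] := by
    intro x; rw [PySem.Set.mem_ofList]; simp
  have hfuel : pvCN clusters (g0 ++ []) * ((clusters.map (fun p => p.2.length)).sum + 1)
      + ([key] : List Int).length
      < clusters.length * ((clusters.map (fun p => p.2.length)).sum + 1) + 2 := by
    have h2 : pvCN clusters (g0 ++ []) * ((clusters.map (fun p => p.2.length)).sum + 1)
        ≤ clusters.length * ((clusters.map (fun p => p.2.length)).sum + 1) :=
      Nat.mul_le_mul_right _ (by simpa using hcn)
    simp only [List.length_cons, List.length_nil]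
    omega
  rw [pvLoopB_eq_fold clusters g0 _ [key] (PySem.Set.ofList g0) [] hseen0 hfuel]
  simp [pvGO]
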